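-- pv_equiv track=rewrite | github.com/Yerioh/Today_I_Learned | 알고리즘 문제 풀기/0808/week2_ap7.py | sail_bread
-- ===== SOURCE A (Python) =====
-- def sail_bread(n, m, k, lst):
--     bread = 0  # 현재 붕어빵의 개수
--     time = 0  # 진행된 시간
--     visited = [0] * n  # 붕어빵을 사간 것을 확인
--     while n > 0:
--         time += m
--         cnt = 0  # 이번 타임에 방문한 손님의 수
--         for i in range(len(lst)):
--             if not visited[i] and lst[i] < time:  # 방문한 적이 없는 손님이 도착했다면
--                 if bread:  # 붕어빵이 있다면
--                     bread -= 1  # 붕어빵 -1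
--                     visited[i] = 1
--                     cnt += 1
--                 else:  # 붕어빵이 없다면
--                     return 'Impossible'
--         n -= cnt  # 남은 손님 수
--         bread += k  # 다음 타임에 팔 붕어빵
--     return 'Possible'
-- ===== SOURCE B (Python) =====
-- def sail_bread(n, m, k, lst):
--     # A customer arriving at t is served in the first round j with t < j*m,
--     # i.e. j = t//m + 1; by then k breads per elapsed round, (j-1)*k total,
--     # must cover every earlier-or-equal arrival.  Sort once and check each
--     # customer's rank against the stock available at its serving round.
--     if n <= 0:
--         return 'Possible'
--     for idx, t in enumerate(sorted(lst)):
--         if idx + 1 > (t // m) * k: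
--             return 'Impossible'
--     return 'Possible'
-- ===== Notes on version B (the rewrite author's own statement) =====
-- stated objective: alternative
-- what changed: Replaces the round-by-round queue simulation (rescanning all customers every m-minute round) by one sort plus a single pass that checks, for each customer in arrival order, whether its rank exceeds the bread stock k*(t//m) available at its serving round.
-- outside the precondition, e.g. on sail_bread(1, 1, -1, [1]): A returns 'Possible', B returns 'Impossible'; on sail_bread(2, 1, 0, [0]): A returns 'Impossible', B returns 'Impossible'; on sail_bread(1, 0, 1, [-1]): A returns 'Impossible', B raises ZeroDivisionError
import Mathlib
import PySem

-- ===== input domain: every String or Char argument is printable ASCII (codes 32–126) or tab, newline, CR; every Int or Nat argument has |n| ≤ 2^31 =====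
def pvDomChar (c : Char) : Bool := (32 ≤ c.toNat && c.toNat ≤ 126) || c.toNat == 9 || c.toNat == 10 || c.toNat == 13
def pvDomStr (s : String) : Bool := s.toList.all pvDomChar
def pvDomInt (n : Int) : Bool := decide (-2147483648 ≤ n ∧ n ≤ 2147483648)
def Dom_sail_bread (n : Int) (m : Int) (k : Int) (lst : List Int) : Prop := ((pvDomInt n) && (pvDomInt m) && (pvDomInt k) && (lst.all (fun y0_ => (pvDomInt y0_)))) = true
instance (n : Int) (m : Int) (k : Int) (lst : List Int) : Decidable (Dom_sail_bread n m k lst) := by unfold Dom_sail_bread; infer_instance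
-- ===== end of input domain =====

-- B replaces A's round-by-round queue simulation by one sort plus a single rank-vs-stock pass;
-- equivalence is claimed on Pre_ (A's natural domain: n = len(lst) with m ≥ 1, k ≥ 0, or n ≤ 0).

-- ===== PORT A =====
-- the inner `for i in range(len(lst))` loop of A, walking the (lst[i], visited[i]) pairs;
-- returns none where Python hits `return 'Impossible'`, else (bread, updated pairs, cnt)
def pvInnerA (time : Int) : List (Int × Int) → Int → Int → Option (Int × List (Int × Int) × Int)
  | [], bread, cnt => some (bread, [], cnt)
  | (t, v) :: rest, bread, cnt =>
      if v = 0 ∧ t < time then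
        if bread ≠ 0 then
          match pvInnerA time rest (bread - 1) (cnt + 1) with
          | none => none
          | some (b, vs, c) => some (b, (t, 1) :: vs, c)
        else none
      else
        match pvInnerA time rest bread cnt with
        | none => none
        | some (b, vs, c) => some (b, (t, v) :: vs, c)

-- A's `while n > 0` loop; the fuel only bounds the recursion (Python has no fuel) and is
-- chosen large enough below that inside Pre_ the exhaustion branch is never reached
def pvOuterA (m k : Int) : Nat → Int → Int → Int → List (Int × Int) → String
  | 0, n, _, _, _ => if 0 < n then "Impossible" else "Possible"
  | fuel + 1, n, bread, time, pairs =>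
      if 0 < n then
        match pvInnerA (time + m) pairs bread 0 with
        | none => "Impossible"
        | some (b, vs, c) => pvOuterA m k fuel (n - c) (b + k) (time + m) vs
      else "Possible"

-- max of the toNat of the arrivals: with m ≥ 1 every customer has arrived before round pvS+1
def pvS (lst : List Int) : Nat := lst.foldr (fun t a => max t.toNat a) 0

def sail_bread (n : Int) (m : Int) (k : Int) (lst : List Int) : String :=
  pvOuterA m k (pvS lst + 2) n 0 0 (lst.zip (List.replicate n.toNat 0))

-- ===== PORT B =====
-- the `for idx, t in enumerate(sorted(lst))` loop of B with its early return
def pvGoB (m k : Int) : List Int → Int → String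
  | [], _ => "Possible"
  | t :: rest, idx =>
      if idx + 1 > (PySem.Int.floordiv t m) * k then "Impossible"
      else pvGoB m k rest (idx + 1)

def sail_bread_alt (n : Int) (m : Int) (k : Int) (lst : List Int) : String :=
  if n ≤ 0 then "Possible"
  else pvGoB m k (PySem.List.sorted lst (fun x => x) false) 0

-- ===== PRECONDITION & SPEC =====
-- Pre_ admits A's natural domain. It excludes: n ≠ len(lst) with n > 0 (malformed input —
-- IndexError or divergence; occasionally an early 'Impossible'), m ≤ 0 (the clock never passes
-- the arrivals — usually divergence), and k < 0 (a negative bread count stays truthy under A's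
-- `if bread:`, so A serves from a negative stock — an artefact; negative production is outside
-- the task's natural domain).
def Pre_sail_bread (n : Int) (m : Int) (k : Int) (lst : List Int) : Prop :=
  n ≤ 0 ∨ (n = (lst.length : Int) ∧ 1 ≤ m ∧ 0 ≤ k)
instance (n : Int) (m : Int) (k : Int) (lst : List Int) : Decidable (Pre_sail_bread n m k lst) := by unfold Pre_sail_bread; infer_instance

def pvWitness_sail_bread : Int × Int × Int × List Int := (3, 2, 1, [2, 5, 3])

def Spec_sail_bread (n : Int) (m : Int) (k : Int) (lst : List Int) (out : String) : Prop := out = sail_bread_alt n m k lst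
instance (n : Int) (m : Int) (k : Int) (lst : List Int) (out : String) : Decidable (Spec_sail_bread n m k lst out) := by unfold Spec_sail_bread; infer_instance

-- ===== CLAIM (what is proved, stated in full; the proofs are below) =====
def Claim_equal_sail_bread : Prop := ∀ (n : Int) (m : Int) (k : Int) (lst : List Int), Dom_sail_bread n m k lst → Pre_sail_bread n m k lst → Spec_sail_bread n m k lst (sail_bread n m k lst)

-- ===== LEMMAS AND PROOFS =====

-- pvC m lst j = how many customers have arrived strictly before the time j*m of round j (0 for
-- j ≤ 0); pvMask m j lst = the (lst[i], visited[i]) pairs A carries after round j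
def pvC (m : Int) (lst : List Int) (j : Int) : Nat :=
  lst.countP (fun t => decide (0 < j ∧ t < j * m))

def pvMask (m : Int) (j : Int) (lst : List Int) : List (Int × Int) :=
  lst.map (fun t => (t, if 0 < j ∧ t < j * m then (1 : Int) else 0))

theorem pvC_zero (m : Int) (lst : List Int) (j : Int) (hj : j ≤ 0) : pvC m lst j = 0 := by
  unfold pvC
  rw [List.countP_eq_zero]
  intro t _ h
  simp only [decide_eq_true_eq] at h
  omega

theorem pvC_le_length (m : Int) (lst : List Int) (j : Int) : pvC m lst j ≤ lst.length :=
  List.countP_le_length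

theorem le_pvS {lst : List Int} {t : Int} (ht : t ∈ lst) : t ≤ (pvS lst : Int) := by
  induction lst with
  | nil => simp at ht
  | cons x xs ih =>
    simp only [List.mem_cons] at ht
    have hx : pvS (x :: xs) = max x.toNat (pvS xs) := rfl
    rcases ht with h | h
    · subst h; push_cast [hx]; omega
    · have := ih h; push_cast [hx] at *; omega

theorem pvC_all (m : Int) (lst : List Int) (hm : 1 ≤ m) {j : Int} (hj : (pvS lst : Int) + 1 ≤ j) :
    pvC m lst j = lst.length := by
  unfold pvC
  rw [List.countP_eq_length]
  intro t ht
  simp only [decide_eq_true_eq]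
  have h1 : t ≤ (pvS lst : Int) := le_pvS ht
  have hj1 : 1 ≤ j := by omega
  refine ⟨by omega, ?_⟩
  have : j * 1 ≤ j * m := mul_le_mul_of_nonneg_left hm (by omega)
  omega

theorem pvInnerA_some (time : Int) (pairs : List (Int × Int)) :
    ∀ (bread cnt : Int), 0 ≤ bread →
    (pairs.countP (fun p => decide (p.2 = 0 ∧ p.1 < time)) : Int) ≤ bread →
    pvInnerA time pairs bread cnt =
      some (bread - pairs.countP (fun p => decide (p.2 = 0 ∧ p.1 < time)),
            pairs.map (fun p => if p.2 = 0 ∧ p.1 < time then (p.1, (1 : Int)) else p),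
            cnt + pairs.countP (fun p => decide (p.2 = 0 ∧ p.1 < time))) := by
  induction pairs with
  | nil => intro bread cnt _ _; simp [pvInnerA]
  | cons p rest ih =>
    intro bread cnt hb hle
    obtain ⟨t, v⟩ := p
    by_cases hp : v = 0 ∧ t < time
    · have hcnt : ((t, v) :: rest).countP (fun p => decide (p.2 = 0 ∧ p.1 < time))
        = rest.countP (fun p => decide (p.2 = 0 ∧ p.1 < time)) + 1 := by
        rw [List.countP_cons]; simp [hp.1, hp.2]
      rw [hcnt] at hle
      have hbne : bread ≠ 0 := by push_cast at hle; omega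
      have := ih (bread - 1) (cnt + 1) (by push_cast at hle ⊢; omega) (by push_cast at hle ⊢; omega)
      simp only [pvInnerA, if_pos hp, if_pos hbne, this]
      simp [hp.1, hp.2]
      constructor <;> ring
    · have hcnt : ((t, v) :: rest).countP (fun p => decide (p.2 = 0 ∧ p.1 < time))
        = rest.countP (fun p => decide (p.2 = 0 ∧ p.1 < time)) := by
        rw [List.countP_cons]; simp only [decide_eq_true_eq]; simp [hp]
      rw [hcnt] at hle
      have := ih bread cnt hb hle
      simp only [pvInnerA, if_neg hp, this]
      simp [hp]

theorem pvInnerA_none (time : Int) (pairs : List (Int × Int)) :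
    ∀ (bread cnt : Int), 0 ≤ bread →
    bread < (pairs.countP (fun p => decide (p.2 = 0 ∧ p.1 < time)) : Int) →
    pvInnerA time pairs bread cnt = none := by
  induction pairs with
  | nil => intro bread cnt hb hlt; simp at hlt; omega
  | cons p rest ih =>
    intro bread cnt hb hlt
    obtain ⟨t, v⟩ := p
    by_cases hp : v = 0 ∧ t < time
    · have hcnt : ((t, v) :: rest).countP (fun p => decide (p.2 = 0 ∧ p.1 < time))
        = rest.countP (fun p => decide (p.2 = 0 ∧ p.1 < time)) + 1 := by
        rw [List.countP_cons]; simp [hp.1, hp.2]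
      rw [hcnt] at hlt
      by_cases hbz : bread = 0
      · simp [pvInnerA, if_pos hp, hbz]
      · have := ih (bread - 1) (cnt + 1) (by omega) (by push_cast at hlt ⊢; omega)
        simp [pvInnerA, if_pos hp, hbz, this]
    · have hcnt : ((t, v) :: rest).countP (fun p => decide (p.2 = 0 ∧ p.1 < time))
        = rest.countP (fun p => decide (p.2 = 0 ∧ p.1 < time)) := by
        rw [List.countP_cons]; simp only [decide_eq_true_eq]; simp [hp]
      rw [hcnt] at hlt
      have := ih bread cnt hb hlt
      simp [pvInnerA, if_neg hp, this]

theorem pv_countP_sub {α : Type} (p q : α → Bool) :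
    ∀ (l : List α), (∀ x ∈ l, q x = true → p x = true) →
    l.countP (fun x => !(q x) && p x) + l.countP q = l.countP p := by
  intro l
  induction l with
  | nil => intro _; simp
  | cons a t ih =>
    intro h
    have ht := ih (fun x hx => h x (List.mem_cons_of_mem a hx))
    have ha := h a (List.mem_cons_self)
    simp only [List.countP_cons]
    cases hqa : q a <;> cases hpa : p a
    · simp; omega
    · simp; omega
    · exact absurd (ha hqa) (by simp [hpa])
    · simp; omega

theorem pvMask_countP (m j : Int) (lst : List Int) (hm : 1 ≤ m) (hj : 1 ≤ j) :
    ((pvMask m (j-1) lst).countP (fun p => decide (p.2 = 0 ∧ p.1 < j * m)) : Int)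
      = (pvC m lst j : Int) - (pvC m lst (j-1) : Int) := by
  unfold pvMask pvC
  rw [List.countP_map]
  have hmono : ∀ t : Int, 0 < j - 1 → t < (j-1) * m → t < j * m := by
    intro t h1 h2
    have : (j-1) * m ≤ j * m := mul_le_mul_of_nonneg_right (by omega) (by omega)
    omega
  have e1 : ((fun p => decide (p.2 = 0 ∧ p.1 < j * m)) ∘
      (fun t => (t, if 0 < j - 1 ∧ t < (j-1) * m then (1 : Int) else 0)))
      = fun t => !(decide (0 < j - 1 ∧ t < (j-1) * m)) && decide (t < j * m) := by
    funext t
    by_cases h : 0 < j - 1 ∧ t < (j-1) * m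
    · simp only [Function.comp_apply, if_pos h]
      rw [Bool.eq_iff_iff]
      simp only [Bool.and_eq_true, Bool.not_eq_true', decide_eq_true_eq, decide_eq_false_iff_not]
      constructor
      · rintro ⟨h1, _⟩; omega
      · rintro ⟨h1, _⟩; exact absurd h h1
    · simp only [Function.comp_apply, if_neg h]
      rw [Bool.eq_iff_iff]
      simp only [Bool.and_eq_true, Bool.not_eq_true', decide_eq_true_eq, decide_eq_false_iff_not]
      tauto
  have e2 : (fun t : Int => decide (0 < j ∧ t < j * m)) = fun t : Int => decide (t < j * m) := by
    funext t
    rw [Bool.eq_iff_iff]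
    simp only [decide_eq_true_eq]
    constructor
    · exact fun h => h.2
    · exact fun h => ⟨by omega, h⟩
  rw [e1, e2]
  have := pv_countP_sub (fun t : Int => decide (t < j * m))
      (fun t : Int => decide (0 < j - 1 ∧ t < (j-1) * m)) lst
      (by intro x _ hx
          simp only [decide_eq_true_eq] at hx ⊢
          exact hmono x hx.1 hx.2)
  push_cast [← this]
  ring

theorem pvMask_update (m j : Int) (lst : List Int) (hm : 1 ≤ m) (hj : 1 ≤ j) :
    (pvMask m (j-1) lst).map (fun p => if p.2 = 0 ∧ p.1 < j * m then (p.1, (1 : Int)) else p)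
      = pvMask m j lst := by
  unfold pvMask
  rw [List.map_map]
  apply List.map_congr_left
  intro t _
  simp only [Function.comp_apply]
  have hmono : (0 < j - 1 ∧ t < (j-1) * m) → t < j * m := by
    rintro ⟨h1, h2⟩
    have : (j-1) * m ≤ j * m := mul_le_mul_of_nonneg_right (by omega) (by omega)
    omega
  by_cases hold : 0 < j - 1 ∧ t < (j-1) * m
  · rw [if_pos hold, if_neg (by simp), if_pos ⟨by omega, hmono hold⟩]
  · rw [if_neg hold]
    by_cases hnew : t < j * m
    · rw [if_pos (by simpa using hnew), if_pos ⟨by omega, hnew⟩]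
    · rw [if_neg (by simpa using hnew), if_neg (by rintro ⟨_, h⟩; exact hnew h)]

theorem pv_bread_nonneg (m k : Int) (lst : List Int) (hk : 0 ≤ k) (j : Int) (hj : 1 ≤ j)
    (hprev : ∀ i : Int, 1 ≤ i → i < j → (pvC m lst i : Int) ≤ (i - 1) * k) :
    0 ≤ (j - 1) * k - (pvC m lst (j-1) : Int) := by
  by_cases hj1 : j = 1
  · subst hj1
    have h0 := pvC_zero m lst (1-1) (by omega)
    omega
  · have h1 := hprev (j-1) (by omega) (by omega)
    have h2 : (j - 1 - 1) * k ≤ (j - 1) * k := mul_le_mul_of_nonneg_right (by omega) hk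
    omega

theorem pvOuterA_ok (m k : Int) (lst : List Int) (hm : 1 ≤ m) (hk : 0 ≤ k)
    (hglob : ∀ j' : Int, 1 ≤ j' → (pvC m lst j' : Int) ≤ (j' - 1) * k) :
    ∀ (fuel : Nat) (j N B T : Int) (P : List (Int × Int)), 1 ≤ j →
    N = (lst.length : Int) - pvC m lst (j-1) →
    B = (j-1) * k - pvC m lst (j-1) →
    T = (j-1) * m →
    P = pvMask m (j-1) lst →
    (pvS lst : Int) + 3 ≤ j + fuel →
    pvOuterA m k fuel N B T P = "Possible" := by
  intro fuel
  induction fuel with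
  | zero =>
    intro j N B T P hj hN hB hT hP hfuel
    have hall : pvC m lst (j-1) = lst.length := pvC_all m lst hm (by omega)
    have : ¬ (0 < N) := by rw [hN, hall]; omega
    simp only [pvOuterA, if_neg this]
  | succ fuel ih =>
    intro j N B T P hj hN hB hT hP hfuel
    by_cases hpos : 0 < N
    · have htime : T + m = j * m := by rw [hT]; ring
      have hcnt : ((pvMask m (j-1) lst).countP (fun p => decide (p.2 = 0 ∧ p.1 < j * m)) : Int)
          = (pvC m lst j : Int) - (pvC m lst (j-1) : Int) :=
        pvMask_countP m j lst hm hj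
      have hb0 : 0 ≤ B := hB ▸ pv_bread_nonneg m k lst hk j hj
        (fun i h1 h2 => hglob i h1)
      have hle : ((pvMask m (j-1) lst).countP (fun p => decide (p.2 = 0 ∧ p.1 < j * m)) : Int) ≤ B := by
        have := hglob j hj
        rw [hcnt, hB]; omega
      have hsome := pvInnerA_some (j * m) (pvMask m (j-1) lst) B 0 hb0 hle
      simp only [pvOuterA, if_pos hpos, hP, htime, hsome]
      rw [pvMask_update m j lst hm hj]
      have hj1 : j + 1 - 1 = j := by ring
      refine ih (j+1) _ _ _ _ (by omega) ?_ ?_ ?_ ?_ (by push_cast at hfuel ⊢; omega)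
      · rw [hj1, hN]; omega
      · rw [hj1, hB]
        have hx : (j-1)*k + k = j*k := by ring
        omega
      · rw [hj1]
      · rw [hj1]
    · simp only [pvOuterA, if_neg hpos]

theorem pv_fail_pos (m k : Int) (lst : List Int) (hk : 0 ≤ k) (j : Int) (hj : 1 ≤ j)
    (hfail : ∃ j' : Int, j ≤ j' ∧ (j' - 1) * k < (pvC m lst j' : Int))
    (hprev : ∀ i : Int, 1 ≤ i → i < j → (pvC m lst i : Int) ≤ (i - 1) * k) :
    0 < (lst.length : Int) - (pvC m lst (j-1) : Int) := by
  obtain ⟨j', hjj', hfj'⟩ := hfail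
  by_contra h
  have hlen : pvC m lst (j-1) = lst.length := by
    have := pvC_le_length m lst (j-1); omega
  have hle : pvC m lst j' ≤ lst.length := pvC_le_length m lst j'
  by_cases hj1 : j = 1
  · subst hj1
    have h0 := pvC_zero m lst (1-1) (by omega)
    have : 0 ≤ (j' - 1) * k := mul_nonneg (by omega) hk
    omega
  · have h1 := hprev (j-1) (by omega) (by omega)
    have h2 : (j - 1 - 1) * k ≤ (j' - 1) * k := mul_le_mul_of_nonneg_right (by omega) hk
    omega

theorem pvOuterA_fail (m k : Int) (lst : List Int) (hm : 1 ≤ m) (hk : 0 ≤ k) :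
    ∀ (fuel : Nat) (j N B T : Int) (P : List (Int × Int)), 1 ≤ j →
    N = (lst.length : Int) - pvC m lst (j-1) →
    B = (j-1) * k - pvC m lst (j-1) →
    T = (j-1) * m →
    P = pvMask m (j-1) lst →
    (∃ j' : Int, j ≤ j' ∧ (j' - 1) * k < (pvC m lst j' : Int)) →
    (∀ i : Int, 1 ≤ i → i < j → (pvC m lst i : Int) ≤ (i - 1) * k) →
    pvOuterA m k fuel N B T P = "Impossible" := by
  intro fuel
  induction fuel with
  | zero =>
    intro j N B T P hj hN hB hT hP hfail hprev
    have hpos : 0 < N := hN ▸ pv_fail_pos m k lst hk j hj hfail hprev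
    simp only [pvOuterA, if_pos hpos]
  | succ fuel ih =>
    intro j N B T P hj hN hB hT hP hfail hprev
    have hpos : 0 < N := hN ▸ pv_fail_pos m k lst hk j hj hfail hprev
    have htime : T + m = j * m := by rw [hT]; ring
    have hcnt : ((pvMask m (j-1) lst).countP (fun p => decide (p.2 = 0 ∧ p.1 < j * m)) : Int)
        = (pvC m lst j : Int) - (pvC m lst (j-1) : Int) :=
      pvMask_countP m j lst hm hj
    have hb0 : 0 ≤ B := hB ▸ pv_bread_nonneg m k lst hk j hj hprev
    by_cases hfj : (j - 1) * k < (pvC m lst j : Int)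
    · have hlt : B < ((pvMask m (j-1) lst).countP (fun p => decide (p.2 = 0 ∧ p.1 < j * m)) : Int) := by
        rw [hcnt, hB]; omega
      have hnone := pvInnerA_none (j * m) (pvMask m (j-1) lst) B 0 hb0 hlt
      simp only [pvOuterA, if_pos hpos, hP, htime, hnone]
    · have hle : ((pvMask m (j-1) lst).countP (fun p => decide (p.2 = 0 ∧ p.1 < j * m)) : Int) ≤ B := by
        rw [hcnt, hB]; omega
      have hsome := pvInnerA_some (j * m) (pvMask m (j-1) lst) B 0 hb0 hle
      simp only [pvOuterA, if_pos hpos, hP, htime, hsome]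
      rw [pvMask_update m j lst hm hj]
      have hj1 : j + 1 - 1 = j := by ring
      refine ih (j+1) _ _ _ _ (by omega) ?_ ?_ ?_ ?_ ?_ ?_
      · rw [hj1, hN]; omega
      · rw [hj1, hB]
        have hx : (j-1)*k + k = j*k := by ring
        omega
      · rw [hj1]
      · rw [hj1]
      · obtain ⟨j', hjj', hfj'⟩ := hfail
        refine ⟨j', ?_, hfj'⟩
        rcases eq_or_lt_of_le hjj' with h | h
        · exact absurd (h ▸ hfj') hfj
        · omega
      · intro i h1 h2
        rcases eq_or_lt_of_le (show i ≤ j by omega) with h | h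
        · subst h; omega
        · exact hprev i h1 (by omega)

theorem pvGoB_possible (m k : Int) : ∀ (arr : List Int) (idx : Int),
    (∀ (i : Nat) (h : i < arr.length), idx + i + 1 ≤ (PySem.Int.floordiv arr[i] m) * k) →
    pvGoB m k arr idx = "Possible" := by
  intro arr
  induction arr with
  | nil => intro idx _; rfl
  | cons t rest ih =>
    intro idx h
    have h0 := h 0 (by simp)
    simp only [List.getElem_cons_zero] at h0
    rw [pvGoB, if_neg (by push_cast at h0 ⊢; omega)]
    apply ih
    intro i hi
    have := h (i+1) (by simpa using hi)
    simp only [List.getElem_cons_succ] at this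
    push_cast at this ⊢
    omega

theorem pvGoB_impossible (m k : Int) : ∀ (arr : List Int) (idx : Int),
    (∃ (i : Nat) (h : i < arr.length), (PySem.Int.floordiv arr[i] m) * k < idx + i + 1) →
    pvGoB m k arr idx = "Impossible" := by
  intro arr
  induction arr with
  | nil => rintro idx ⟨i, h, _⟩; simp at h
  | cons t rest ih =>
    rintro idx ⟨i, hi, hlt⟩
    by_cases h0 : idx + 1 > (PySem.Int.floordiv t m) * k
    · rw [pvGoB, if_pos h0]
    · rw [pvGoB, if_neg h0]
      apply ih
      match i with
      | 0 =>
        simp only [List.getElem_cons_zero] at hlt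
        omega
      | i' + 1 =>
        simp only [List.getElem_cons_succ] at hlt
        exact ⟨i', by simpa using hi, by push_cast at hlt ⊢; omega⟩

theorem pv_fd_lt (m t : Int) (hm : 1 ≤ m) {j : Int} (hfd : PySem.Int.floordiv t m + 1 ≤ j) :
    t < j * m := by
  have h1 := PySem.Int.floordiv_mul_add_mod t m
  have h2 := PySem.Int.mod_lt t (show (0:Int) < m by omega)
  have h3 : (PySem.Int.floordiv t m + 1) * m ≤ j * m :=
    mul_le_mul_of_nonneg_right hfd (by omega)
  nlinarith [h3, h1, h2]

theorem pv_bridge (m k : Int) (lst : List Int) (hm : 1 ≤ m) (hk : 0 ≤ k) :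
    (∃ (i : Nat) (h : i < (PySem.List.sorted lst (fun x => x) false).length),
        (PySem.Int.floordiv (PySem.List.sorted lst (fun x => x) false)[i] m) * k < (i : Int) + 1)
      ↔ (∃ j : Int, 1 ≤ j ∧ (j - 1) * k < (pvC m lst j : Int)) := by
  set arr := PySem.List.sorted lst (fun x => x) false with harr
  have hperm : arr.Perm lst := PySem.List.sorted_perm lst (fun x => x) false
  have hlen_eq : (PySem.List.sorted lst (fun x => x) false).length = arr.length := rfl
  have hcnt : ∀ j : Int, pvC m lst j = arr.countP (fun t => decide (0 < j ∧ t < j * m)) := by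
    intro j; unfold pvC; exact (hperm.countP_eq _).symm
  constructor
  · rintro ⟨i, hi, hcond⟩
    set fd := PySem.Int.floordiv arr[i] m with hfd
    refine ⟨max (fd + 1) 1, le_max_right _ _, ?_⟩
    set j := max (fd + 1) 1 with hj
    have hj1 : (1:Int) ≤ j := le_max_right _ _
    have htlt : arr[i] < j * m := pv_fd_lt m arr[i] hm (le_max_left _ _)
    have hcj : (i : Int) + 1 ≤ (pvC m lst j : Int) := by
      have hlen1 : (arr.take (i+1)).length = i + 1 := by
        rw [List.length_take]; omega
      have htake : (arr.take (i+1)).countP (fun t => decide (0 < j ∧ t < j * m))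
          = (arr.take (i+1)).length := by
        rw [List.countP_eq_length]
        intro x hx
        rw [List.mem_take_iff_getElem] at hx
        obtain ⟨l, hl, rfl⟩ := hx
        have hle : arr[l]'(by omega) ≤ arr[i] :=
          PySem.List.sorted_id_getElem_mono lst (by omega) hi
        simp only [decide_eq_true_eq]
        exact ⟨by omega, by omega⟩
      have hsplit : arr.countP (fun t => decide (0 < j ∧ t < j * m))
          = (arr.take (i+1)).countP (fun t => decide (0 < j ∧ t < j * m))
            + (arr.drop (i+1)).countP (fun t => decide (0 < j ∧ t < j * m)) := by
        rw [← List.countP_append, List.take_append_drop]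
      have hc := hcnt j
      omega
    rcases (show 0 ≤ fd ∨ fd < 0 by omega) with h | h
    · have hj2 : j = fd + 1 := by rw [hj]; exact max_eq_left (by omega)
      have hk2 : (j - 1) * k = fd * k := by rw [hj2]; ring
      omega
    · have hj2 : j = 1 := by rw [hj]; exact max_eq_right (by omega)
      have hk2 : (j - 1) * k = 0 := by rw [hj2]; ring
      omega
  · rintro ⟨j, hj, hfail⟩
    have hk0 : 0 ≤ (j - 1) * k := mul_nonneg (by omega) hk
    have hcj1 : 1 ≤ pvC m lst j := by omega
    have hlen : pvC m lst j ≤ arr.length := by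
      rw [hcnt]; exact List.countP_le_length
    set i : Nat := pvC m lst j - 1 with hi
    have hilt : i < arr.length := by omega
    refine ⟨i, hilt, ?_⟩
    have htlt : arr[i] < j * m := by
      by_contra hge
      rw [not_lt] at hge
      have hdrop : (arr.drop i).countP (fun t => decide (0 < j ∧ t < j * m)) = 0 := by
        rw [List.countP_eq_zero]
        intro x hx
        rw [List.mem_drop_iff_getElem] at hx
        obtain ⟨l, hl, rfl⟩ := hx
        have : arr[i] ≤ arr[i + l]'(by omega) :=
          PySem.List.sorted_id_getElem_mono lst (by omega) (by omega)
        simp only [decide_eq_true_eq]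
        rintro ⟨_, hlt⟩
        omega
      have hsplit : arr.countP (fun t => decide (0 < j ∧ t < j * m))
          = (arr.take i).countP (fun t => decide (0 < j ∧ t < j * m))
            + (arr.drop i).countP (fun t => decide (0 < j ∧ t < j * m)) := by
        rw [← List.countP_append, List.take_append_drop]
      have htk : (arr.take i).countP (fun t => decide (0 < j ∧ t < j * m)) ≤ i := by
        calc (arr.take i).countP _ ≤ (arr.take i).length := List.countP_le_length
        _ ≤ i := by simp
      have hc := hcnt j
      omega
    have hfdle : PySem.Int.floordiv arr[i] m ≤ j - 1 := by
      have := (PySem.Int.floordiv_lt_iff_lt_mul (a := arr[i]) (show (0:Int) < m by omega) (q := j)).mpr htlt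
      omega
    have : PySem.Int.floordiv arr[i] m * k ≤ (j - 1) * k :=
      mul_le_mul_of_nonneg_right hfdle hk
    omega

theorem pv_zip_repl (m : Int) (lst : List Int) :
    lst.zip (List.replicate lst.length (0:Int)) = pvMask m 0 lst := by
  induction lst with
  | nil => rfl
  | cons t rest ih =>
    simp only [List.length_cons, List.replicate_succ, List.zip_cons_cons, pvMask, List.map_cons]
    rw [if_neg (by rintro ⟨h, _⟩; omega)]
    unfold pvMask at ih
    rw [ih]

theorem pv_main (n m k : Int) (lst : List Int)
    (hpre : n ≤ 0 ∨ (n = (lst.length : Int) ∧ 1 ≤ m ∧ 0 ≤ k)) :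
    sail_bread n m k lst = sail_bread_alt n m k lst := by
  by_cases hn0 : 0 < n
  · rcases hpre with hn | ⟨hn, hm, hk⟩
    · omega
    · unfold sail_bread sail_bread_alt
      rw [if_neg (by omega)]
      have hzip : lst.zip (List.replicate n.toNat 0) = pvMask m (1-1) lst := by
        rw [show n.toNat = lst.length by omega, pv_zip_repl m lst]
        norm_num
      have hc0 : pvC m lst (1-1) = 0 := pvC_zero m lst (1-1) (by omega)
      by_cases hfB : ∃ (i : Nat) (h : i < (PySem.List.sorted lst (fun x => x) false).length),
          (PySem.Int.floordiv (PySem.List.sorted lst (fun x => x) false)[i] m) * k < (i : Int) + 1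
      · rw [pvGoB_impossible m k _ 0 (by obtain ⟨i, h, hc⟩ := hfB; exact ⟨i, h, by omega⟩)]
        apply pvOuterA_fail m k lst hm hk _ 1 _ _ _ _ le_rfl
        · rw [hn, hc0]; omega
        · rw [hc0]; omega
        · ring
        · exact hzip
        · exact (pv_bridge m k lst hm hk).mp hfB
        · intro i h1 h2; omega
      · have hnofail : ∀ j' : Int, 1 ≤ j' → (pvC m lst j' : Int) ≤ (j' - 1) * k := by
          intro j' hj'
          by_contra h
          exact hfB ((pv_bridge m k lst hm hk).mpr ⟨j', hj', by omega⟩)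
        rw [pvGoB_possible m k _ 0 (by
          intro i h
          by_contra hc
          exact hfB ⟨i, h, by omega⟩)]
        apply pvOuterA_ok m k lst hm hk hnofail _ 1 _ _ _ _ le_rfl
        · rw [hn, hc0]; omega
        · rw [hc0]; omega
        · ring
        · exact hzip
        · push_cast; omega
  · unfold sail_bread sail_bread_alt
    rw [if_pos (by omega)]
    show pvOuterA m k (pvS lst + 1 + 1) n 0 0 _ = "Possible"
    simp only [pvOuterA, if_neg hn0]

-- ===== VERDICT (by name: the statement is the Claim_ definition above) =====
theorem sail_bread_spec : Claim_equal_sail_bread := by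
  intro n m k lst _ hpre
  exact pv_main n m k lst hpre
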